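-- pv_equiv track=rewrite | github.com/MdAbedin/binarysearch | 0701 - 0800/0784 Monotonous String Groups 🎃.py | solve
-- ===== SOURCE A (Python) =====
-- def solve(s):
--     ans = 0
--     i = 0
--
--     while i < len(s):
--       ans += 1
--       first = s[i]
--
--       while i < len(s) and s[i] == first: i += 1
--       if i >= len(s): break
--
--       d = 1 if s[i] > s[i-1] else -1
--       while i < len(s) and (s[i] >= s[i-1] if d == 1 else s[i] <= s[i-1]): i += 1
--
--     return ans
-- ===== SOURCE B (Python) =====
-- def solve(s):
--     if not s:
--         return 0
--     ans = 1
--     cur = 0  # 0 = direction of current group not fixed yet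
--     for i in range(1, len(s)):
--         sign = (s[i] > s[i-1]) - (s[i] < s[i-1])
--         if sign == 0:
--             continue
--         if cur == 0:
--             cur = sign
--         elif sign != cur:
--             ans += 1
--             cur = 0
--     return ans
-- ===== Notes on version B (the rewrite author's own statement) =====
-- stated objective: simpler
-- what changed: Replaced A's nested while-loops (three inner index-scanning phases per group) with a single flat pass over adjacent comparison signs that keeps a direction state resetting to undecided on each reversal.
import Mathlib
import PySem

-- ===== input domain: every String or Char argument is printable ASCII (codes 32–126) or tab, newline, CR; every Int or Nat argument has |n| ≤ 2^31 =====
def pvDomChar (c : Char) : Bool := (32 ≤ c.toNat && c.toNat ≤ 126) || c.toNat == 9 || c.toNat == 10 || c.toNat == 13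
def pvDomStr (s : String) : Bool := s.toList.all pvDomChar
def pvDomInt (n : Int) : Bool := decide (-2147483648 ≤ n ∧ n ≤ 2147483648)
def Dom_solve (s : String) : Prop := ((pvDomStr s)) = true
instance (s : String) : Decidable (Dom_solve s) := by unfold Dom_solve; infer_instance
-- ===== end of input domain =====

-- B replaces A's nested index-based while loops with a single flat pass over adjacent
-- comparison signs, keeping a direction state that resets on each reversal; objective: simpler.

-- ===== PORT A =====
-- while i < len(s) and s[i] == first: i += 1
def skipEq (cs : List Char) (first : Char) (i : Nat) : Nat :=
  if h : i < cs.length then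
    if cs[i] = first then skipEq cs first (i + 1) else i
  else i
termination_by cs.length - i

-- while i < len(s) and s[i] >= s[i-1]: i += 1   (d = 1 case; every call has i ≥ 1)
def skipGE (cs : List Char) (i : Nat) : Nat :=
  if h : i < cs.length then
    if cs[i - 1]! ≤ cs[i] then skipGE cs (i + 1) else i
  else i
termination_by cs.length - i

-- while i < len(s) and s[i] <= s[i-1]: i += 1   (d = -1 case; every call has i ≥ 1)
def skipLE (cs : List Char) (i : Nat) : Nat :=
  if h : i < cs.length then
    if cs[i] ≤ cs[i - 1]! then skipLE cs (i + 1) else i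
  else i
termination_by cs.length - i

theorem skipEq_ge (cs : List Char) (first : Char) (i : Nat) : i ≤ skipEq cs first i := by
  rw [skipEq]
  split
  · split
    · exact le_trans (Nat.le_succ i) (skipEq_ge cs first (i + 1))
    · exact le_refl i
  · exact le_refl i
termination_by cs.length - i

theorem skipGE_ge (cs : List Char) (i : Nat) : i ≤ skipGE cs i := by
  rw [skipGE]
  split
  · split
    · exact le_trans (Nat.le_succ i) (skipGE_ge cs (i + 1))
    · exact le_refl i
  · exact le_refl i
termination_by cs.length - i

theorem skipLE_ge (cs : List Char) (i : Nat) : i ≤ skipLE cs i := by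
  rw [skipLE]
  split
  · split
    · exact le_trans (Nat.le_succ i) (skipLE_ge cs (i + 1))
    · exact le_refl i
  · exact le_refl i
termination_by cs.length - i

theorem skipEq_gt (cs : List Char) (i : Nat) (h : i < cs.length) (he : cs[i] = first) :
    i < skipEq cs first i := by
  rw [skipEq]
  rw [dif_pos h, if_pos he]
  exact lt_of_lt_of_le (Nat.lt_succ_self i) (skipEq_ge cs first (i + 1))

-- outer while loop of A (Python's locals ans, first, d, k are inlined at their single use sites)
def loopA (cs : List Char) (i : Nat) (ans : Int) : Int :=
  if h : i < cs.length then
    if hj : skipEq cs cs[i] i < cs.length then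
      loopA cs
        (if (if cs[skipEq cs cs[i] i - 1]! < cs[skipEq cs cs[i] i] then (1 : Int) else -1) = 1
         then skipGE cs (skipEq cs cs[i] i) else skipLE cs (skipEq cs cs[i] i))
        (ans + 1)
    else ans + 1
  else ans
termination_by cs.length - i
decreasing_by
  have h1 : i < skipEq cs cs[i] i := skipEq_gt cs i h rfl
  have h2 := skipGE_ge cs (skipEq cs cs[i] i)
  have h3 := skipLE_ge cs (skipEq cs cs[i] i)
  split <;> split <;> omega

def solve (s : String) : Int := loopA s.toList 0 0

-- ===== PORT B =====
-- the single for-loop of Source B: prev = s[i-1], cur = direction state, ans = accumulator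
def loopB (prev : Char) (rest : List Char) (cur : Int) (ans : Int) : Int :=
  match rest with
  | [] => ans
  | c :: r =>
    let sign : Int := (if prev < c then 1 else 0) - (if c < prev then 1 else 0)
    if sign = 0 then loopB c r cur ans
    else if cur = 0 then loopB c r sign ans
    else if sign ≠ cur then loopB c r 0 (ans + 1)
    else loopB c r cur ans

def solve_alt (s : String) : Int :=
  match s.toList with
  | [] => 0
  | c :: r => loopB c r 0 1

-- ===== PRECONDITION & SPEC =====
def Spec_solve (s : String) (out : Int) : Prop := out = solve_alt s
instance (s : String) (out : Int) : Decidable (Spec_solve s out) := by unfold Spec_solve; infer_instance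

-- ===== CLAIM (what is proved, stated in full; the proofs are below) =====
def Claim_equal_solve : Prop := ∀ (s : String), Dom_solve s → Spec_solve s (solve s)

-- ===== LEMMAS AND PROOFS =====

-- list-level model of A's three inner phases
mutual
def afterEq (c : Char) : List Char → Int
  | [] => 0
  | d :: r => if d = c then afterEq d r else if c < d then afterUp d r else afterDown d r

def afterUp (p : Char) : List Char → Int
  | [] => 0
  | d :: r => if p ≤ d then afterUp d r else 1 + afterEq d r

def afterDown (p : Char) : List Char → Int
  | [] => 0
  | d :: r => if d ≤ p then afterDown d r else 1 + afterEq d r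
end

def countA : List Char → Int
  | [] => 0
  | c :: r => 1 + afterEq c r

-- lengths of the runs A's inner loops consume
def eqLen (f : Char) : List Char → Nat
  | [] => 0
  | d :: r => if d = f then 1 + eqLen f r else 0

def upLen (p : Char) : List Char → Nat
  | [] => 0
  | d :: r => if p ≤ d then 1 + upLen d r else 0

def downLen (p : Char) : List Char → Nat
  | [] => 0
  | d :: r => if d ≤ p then 1 + downLen d r else 0

theorem eqLen_le (f : Char) (l : List Char) : eqLen f l ≤ l.length := by
  induction l with
  | nil => simp [eqLen]
  | cons d r ih => simp only [eqLen, List.length_cons]; split <;> omega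

theorem eqLen_getElem (f : Char) (l : List Char) (n : Nat) (hn : n < eqLen f l)
    (h : n < l.length) : l[n] = f := by
  induction l generalizing n with
  | nil => simp at h
  | cons d r ih =>
    simp only [eqLen] at hn
    by_cases hd : d = f
    · rw [if_pos hd] at hn
      cases n with
      | zero => simpa using hd
      | succ m =>
        simp only [List.getElem_cons_succ]
        exact ih m (by omega) (by simp at h; omega)
    · rw [if_neg hd] at hn; omega

theorem eqLen_drop_eqLen (f : Char) (l : List Char) :
    eqLen f (l.drop (eqLen f l)) = 0 := by
  induction l with
  | nil => simp [eqLen]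
  | cons d r ih =>
    by_cases hd : d = f
    · simp only [eqLen, if_pos hd, Nat.add_comm 1 (eqLen f r), List.drop_succ_cons]
      exact ih
    · simp [eqLen, hd]

theorem afterEq_drop_eqLen (f : Char) (l : List Char) :
    afterEq f l = afterEq f (l.drop (eqLen f l)) := by
  induction l with
  | nil => simp
  | cons d r ih =>
    by_cases hd : d = f
    · subst hd
      simpa [afterEq, eqLen, Nat.add_comm 1 (eqLen d r)] using ih
    · simp [afterEq, eqLen, hd]

theorem afterUp_drop (p : Char) (l : List Char) :
    afterUp p l = countA (l.drop (upLen p l)) := by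
  induction l generalizing p with
  | nil => simp [afterUp, countA]
  | cons d r ih =>
    by_cases hd : p ≤ d
    · simp only [afterUp, upLen, if_pos hd, Nat.add_comm 1 (upLen d r), List.drop_succ_cons]
      exact ih d
    · simp [afterUp, upLen, hd, countA]

theorem afterDown_drop (p : Char) (l : List Char) :
    afterDown p l = countA (l.drop (downLen p l)) := by
  induction l generalizing p with
  | nil => simp [afterDown, countA]
  | cons d r ih =>
    by_cases hd : d ≤ p
    · simp only [afterDown, downLen, if_pos hd, Nat.add_comm 1 (downLen d r), List.drop_succ_cons]
      exact ih d
    · simp [afterDown, downLen, hd, countA]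

theorem skipEq_spec (cs : List Char) (f : Char) :
    ∀ m i, cs.length - i ≤ m → skipEq cs f i = i + eqLen f (cs.drop i) := by
  intro m
  induction m with
  | zero =>
    intro i h
    rw [skipEq, dif_neg (by omega)]
    rw [List.drop_eq_nil_of_le (by omega)]
    simp [eqLen]
  | succ m ih =>
    intro i h
    rw [skipEq]
    by_cases hi : i < cs.length
    · rw [dif_pos hi]
      have hdrop : cs.drop i = cs[i] :: cs.drop (i + 1) := List.drop_eq_getElem_cons hi
      by_cases he : cs[i] = f
      · rw [if_pos he, ih (i + 1) (by omega)]
        rw [hdrop]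
        simp only [eqLen, if_pos he]
        omega
      · rw [if_neg he, hdrop]
        simp [eqLen, he]
    · rw [dif_neg hi]
      rw [List.drop_eq_nil_of_le (by omega)]
      simp [eqLen]

theorem skipGE_spec (cs : List Char) :
    ∀ m i, cs.length - i ≤ m → 1 ≤ i → skipGE cs i = i + upLen (cs[i - 1]!) (cs.drop i) := by
  intro m
  induction m with
  | zero =>
    intro i h _
    rw [skipGE, dif_neg (by omega)]
    rw [List.drop_eq_nil_of_le (by omega)]
    simp [upLen]
  | succ m ih =>
    intro i h h1
    rw [skipGE]
    by_cases hi : i < cs.length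
    · rw [dif_pos hi]
      have hdrop : cs.drop i = cs[i] :: cs.drop (i + 1) := List.drop_eq_getElem_cons hi
      by_cases hc : cs[i - 1]! ≤ cs[i]
      · rw [if_pos hc, ih (i + 1) (by omega) (by omega)]
        have : cs[i + 1 - 1]! = cs[i] := by
          simp only [Nat.add_sub_cancel]
          exact getElem!_pos cs i hi
        rw [this, hdrop]
        simp only [upLen, if_pos hc]
        omega
      · rw [if_neg hc, hdrop]
        simp only [upLen, if_neg hc]
        omega
    · rw [dif_neg hi]
      rw [List.drop_eq_nil_of_le (by omega)]
      simp [upLen]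

theorem skipLE_spec (cs : List Char) :
    ∀ m i, cs.length - i ≤ m → 1 ≤ i → skipLE cs i = i + downLen (cs[i - 1]!) (cs.drop i) := by
  intro m
  induction m with
  | zero =>
    intro i h _
    rw [skipLE, dif_neg (by omega)]
    rw [List.drop_eq_nil_of_le (by omega)]
    simp [downLen]
  | succ m ih =>
    intro i h h1
    rw [skipLE]
    by_cases hi : i < cs.length
    · rw [dif_pos hi]
      have hdrop : cs.drop i = cs[i] :: cs.drop (i + 1) := List.drop_eq_getElem_cons hi
      by_cases hc : cs[i] ≤ cs[i - 1]!
      · rw [if_pos hc, ih (i + 1) (by omega) (by omega)]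
        have : cs[i + 1 - 1]! = cs[i] := by
          simp only [Nat.add_sub_cancel]
          exact getElem!_pos cs i hi
        rw [this, hdrop]
        simp only [downLen, if_pos hc]
        omega
      · rw [if_neg hc, hdrop]
        simp only [downLen, if_neg hc]
        omega
    · rw [dif_neg hi]
      rw [List.drop_eq_nil_of_le (by omega)]
      simp [downLen]

theorem loopA_eq (cs : List Char) :
    ∀ m i ans, cs.length - i ≤ m → loopA cs i ans = ans + countA (cs.drop i) := by
  intro m
  induction m with
  | zero =>
    intro i ans h
    rw [loopA, dif_neg (by omega)]
    rw [List.drop_eq_nil_of_le (by omega)]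
    simp [countA]
  | succ m ih =>
    intro i ans h
    by_cases hi : i < cs.length
    · have hdrop : cs.drop i = cs[i] :: cs.drop (i + 1) := List.drop_eq_getElem_cons hi
      obtain ⟨n, hn⟩ : ∃ n, eqLen cs[i] (cs.drop i) = n := ⟨_, rfl⟩
      have hn1 : 1 ≤ n := by
        rw [← hn, hdrop]
        simp [eqLen]
      have hnle : n ≤ cs.length - i := by
        have h1 := eqLen_le cs[i] (cs.drop i)
        simp only [List.length_drop] at h1
        omega
      have hskip : skipEq cs cs[i] i = i + n := by
        rw [skipEq_spec cs cs[i] (cs.length - i) i (le_refl _), hn]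
      have hdropj : cs.drop (i + n) = (cs.drop i).drop n := by
        rw [List.drop_drop]
      have heqj : eqLen cs[i] (cs.drop (i + n)) = 0 := by
        rw [hdropj, ← hn]
        exact eqLen_drop_eqLen cs[i] (cs.drop i)
      have hafter : afterEq cs[i] (cs.drop (i + 1)) = afterEq cs[i] (cs.drop (i + n)) := by
        have h1 : eqLen cs[i] (cs.drop (i + 1)) = n - 1 := by
          rw [← hn, hdrop]
          simp [eqLen]
        have h2 : (cs.drop (i + 1)).drop (n - 1) = cs.drop (i + n) := by
          rw [List.drop_drop]
          congr 1
          omega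
        rw [afterEq_drop_eqLen cs[i] (cs.drop (i + 1)), h1, h2]
      have hrhs : countA (cs.drop i) = 1 + afterEq cs[i] (cs.drop (i + n)) := by
        rw [hdrop]
        simp only [countA]
        rw [hafter]
      rw [loopA, dif_pos hi]
      rw [hskip]
      by_cases hjl : i + n < cs.length
      · rw [dif_pos hjl]
        have hlt : i + n - 1 < cs.length := by omega
        have hlen : n - 1 < (cs.drop i).length := by
          simp only [List.length_drop]
          omega
        have hlast : cs[i + n - 1]! = cs[i] := by
          rw [getElem!_pos cs (i + n - 1) hlt]
          have hidx : i + (n - 1) = i + n - 1 := by omega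
          have hdg : (cs.drop i)[n - 1]'hlen = cs[i + n - 1]'hlt := by
            rw [List.getElem_drop]
            simp only [hidx]
          rw [← hdg]
          exact eqLen_getElem cs[i] (cs.drop i) (n - 1) (by omega) hlen
        have hdropj2 : cs.drop (i + n) = cs[i + n] :: cs.drop (i + n + 1) :=
          List.drop_eq_getElem_cons hjl
        have hdc : cs[i + n] ≠ cs[i] := by
          intro hdc2
          rw [hdropj2] at heqj
          simp [eqLen, hdc2] at heqj
        rw [hlast]
        by_cases hcd : cs[i] < cs[i + n]
        · rw [if_pos hcd, if_pos rfl]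
          have hk : skipGE cs (i + n) = i + n + 1 + upLen cs[i + n] (cs.drop (i + n + 1)) := by
            have hs := skipGE_spec cs (cs.length - (i + n)) (i + n) (le_refl _) (by omega)
            rw [hs, hlast, hdropj2]
            simp only [upLen, if_pos (le_of_lt hcd)]
            omega
          rw [ih (skipGE cs (i + n)) (ans + 1) (by rw [hk]; omega)]
          have hup : afterEq cs[i] (cs.drop (i + n)) = afterUp cs[i + n] (cs.drop (i + n + 1)) := by
            rw [hdropj2]
            simp [afterEq, hdc, hcd]
          rw [hrhs, hup, afterUp_drop, hk, List.drop_drop]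
          omega
        · rw [if_neg hcd, if_neg (by decide : ¬((-1 : Int) = 1))]
          have hdlt : cs[i + n] < cs[i] := lt_of_le_of_ne (le_of_not_gt hcd) hdc
          have hk : skipLE cs (i + n) = i + n + 1 + downLen cs[i + n] (cs.drop (i + n + 1)) := by
            have hs := skipLE_spec cs (cs.length - (i + n)) (i + n) (le_refl _) (by omega)
            rw [hs, hlast, hdropj2]
            simp only [downLen, if_pos (le_of_lt hdlt)]
            omega
          rw [ih (skipLE cs (i + n)) (ans + 1) (by rw [hk]; omega)]
          have hdn : afterEq cs[i] (cs.drop (i + n)) = afterDown cs[i + n] (cs.drop (i + n + 1)) := by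
            rw [hdropj2]
            simp [afterEq, hdc, hcd]
          rw [hrhs, hdn, afterDown_drop, hk, List.drop_drop]
          omega
      · rw [dif_neg hjl]
        rw [hrhs, List.drop_eq_nil_of_le (by omega : cs.length ≤ i + n)]
        simp [afterEq]
    · rw [loopA, dif_neg hi]
      rw [List.drop_eq_nil_of_le (by omega)]
      simp [countA]

theorem loopB_eq (r : List Char) : ∀ (p : Char) (a : Int),
    loopB p r 0 a = a + afterEq p r ∧ loopB p r 1 a = a + afterUp p r ∧
    loopB p r (-1) a = a + afterDown p r := by
  induction r with
  | nil => intro p a; simp [loopB, afterEq, afterUp, afterDown]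
  | cons c r ih =>
    intro p a
    rcases lt_trichotomy p c with hlt | heq | hgt
    · have h1 : (if p < c then (1:Int) else 0) - (if c < p then (1:Int) else 0) = 1 := by
        rw [if_pos hlt, if_neg (asymm hlt)]; ring
      have hne : c ≠ p := (ne_of_gt hlt)
      refine ⟨?_, ?_, ?_⟩
      · simp only [loopB, h1]
        norm_num
        rw [(ih c a).2.1]
        simp [afterEq, hne, hlt]
      · simp only [loopB, h1]
        norm_num
        rw [(ih c a).2.1]
        simp [afterUp, le_of_lt hlt]
      · simp only [loopB, h1]
        norm_num
        rw [(ih c (a + 1)).1]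
        simp only [afterDown, if_neg (not_le_of_gt hlt)]
        ring
    · have h1 : (if p < c then (1:Int) else 0) - (if c < p then (1:Int) else 0) = 0 := by
        rw [if_neg (by simp [heq]), if_neg (by simp [heq])]; ring
      subst heq
      refine ⟨?_, ?_, ?_⟩
      · simp only [loopB, h1]
        rw [(ih p a).1]
        simp [afterEq]
      · simp only [loopB, h1]
        rw [(ih p a).2.1]
        simp [afterUp]
      · simp only [loopB, h1]
        rw [(ih p a).2.2]
        simp [afterDown]
    · have h1 : (if p < c then (1:Int) else 0) - (if c < p then (1:Int) else 0) = -1 := by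
        rw [if_neg (asymm hgt), if_pos hgt]; ring
      have hne : c ≠ p := (ne_of_lt hgt)
      refine ⟨?_, ?_, ?_⟩
      · simp only [loopB, h1]
        norm_num
        rw [(ih c a).2.2]
        simp [afterEq, hne, asymm hgt]
      · simp only [loopB, h1]
        norm_num
        rw [(ih c (a + 1)).1]
        simp only [afterUp, if_neg (not_le_of_gt hgt)]
        ring
      · simp only [loopB, h1]
        norm_num
        rw [(ih c a).2.2]
        simp [afterDown, le_of_lt hgt]

theorem solve_eq_countA (s : String) : solve s = countA s.toList := by
  unfold solve
  rw [loopA_eq s.toList s.toList.length 0 0 (by omega)]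
  simp

theorem solve_alt_eq_countA (s : String) : solve_alt s = countA s.toList := by
  unfold solve_alt
  cases h : s.toList with
  | nil => simp [countA]
  | cons c r =>
    show loopB c r 0 1 = countA (c :: r)
    rw [(loopB_eq r c 1).1]
    simp [countA]

-- ===== VERDICT (by name: the statement is the Claim_ definition above) =====
theorem solve_spec : Claim_equal_solve := by
  intro s _
  unfold Spec_solve
  rw [solve_eq_countA, solve_alt_eq_countA]
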